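-- pv_equiv track=rewrite | github.com/edisonzzz/bakscanner | dic/1.py | gen_simple_year_backup_patterns
-- ===== SOURCE A (Python) =====
-- def gen_simple_year_backup_patterns(years):
--     """
--     生成年份级别的简化备份：
--       backup_2024.zip
--       wwwroot_2023.tar.gz
--       db_2022.sql
--     """
--     patterns = []
--     for y in years:
--         patterns.extend([
--             f"backup_{y}.zip",
--             f"backup_{y}.tar.gz",
--             f"site_{y}.zip",
--             f"site_{y}.tar.gz",
--             f"wwwroot_{y}.zip",
--             f"wwwroot_{y}.tar.gz",
--             f"db_{y}.sql",
--             f"db_{y}.sql.gz",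
--         ])
--     return patterns
-- ===== SOURCE B (Python) =====
-- _TABLE = [
--     ("backup", ["zip", "tar.gz"]),
--     ("site", ["zip", "tar.gz"]),
--     ("wwwroot", ["zip", "tar.gz"]),
--     ("db", ["sql", "sql.gz"]),
-- ]
--
-- def gen_simple_year_backup_patterns(years):
--     return [f"{prefix}_{y}.{ext}"
--             for y in years
--             for prefix, exts in _TABLE
--             for ext in exts]
-- ===== Notes on version B (the rewrite author's own statement) =====
-- stated objective: simpler
-- what changed: Replaces the flat hardcoded 8-string extend per year with a nested comprehension driven by a (prefix, extensions) configuration table, preserving the exact emission order including the db sql/sql.gz case.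
import Mathlib
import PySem

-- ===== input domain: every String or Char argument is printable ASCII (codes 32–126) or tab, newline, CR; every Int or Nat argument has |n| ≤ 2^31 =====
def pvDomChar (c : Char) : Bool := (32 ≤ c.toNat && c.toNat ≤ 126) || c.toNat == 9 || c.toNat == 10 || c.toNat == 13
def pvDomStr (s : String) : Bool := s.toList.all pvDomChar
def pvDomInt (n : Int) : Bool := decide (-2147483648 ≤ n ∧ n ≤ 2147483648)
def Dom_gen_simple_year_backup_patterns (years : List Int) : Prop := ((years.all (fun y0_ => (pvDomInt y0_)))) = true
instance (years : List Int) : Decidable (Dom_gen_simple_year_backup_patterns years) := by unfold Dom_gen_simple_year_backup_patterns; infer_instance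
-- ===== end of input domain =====

-- B replaces A's flat per-year extend of eight literal strings with a nested loop over a
-- (prefix, extensions) configuration table; same output, objective: simpler decomposition.

-- ===== PORT A =====
-- A: accumulate, for each year, the eight hardcoded f-strings via patterns.extend.
def gen_simple_year_backup_patterns (years : List Int) : List String :=
  years.foldl (fun patterns y =>
    patterns ++ [
      "backup_" ++ PySem.Int.toStr y ++ ".zip",
      "backup_" ++ PySem.Int.toStr y ++ ".tar.gz",
      "site_" ++ PySem.Int.toStr y ++ ".zip",
      "site_" ++ PySem.Int.toStr y ++ ".tar.gz",
      "wwwroot_" ++ PySem.Int.toStr y ++ ".zip",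
      "wwwroot_" ++ PySem.Int.toStr y ++ ".tar.gz",
      "db_" ++ PySem.Int.toStr y ++ ".sql",
      "db_" ++ PySem.Int.toStr y ++ ".sql.gz"]) []

-- ===== PORT B =====
-- B: nested comprehension over years × configuration table × extensions.
def pvTable : List (String × List String) :=
  [("backup", ["zip", "tar.gz"]),
   ("site", ["zip", "tar.gz"]),
   ("wwwroot", ["zip", "tar.gz"]),
   ("db", ["sql", "sql.gz"])]

def gen_simple_year_backup_patterns_alt (years : List Int) : List String :=
  years.flatMap (fun y =>
    pvTable.flatMap (fun pe =>
      pe.2.map (fun ext => pe.1 ++ "_" ++ PySem.Int.toStr y ++ "." ++ ext)))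

-- ===== PRECONDITION & SPEC =====
def Spec_gen_simple_year_backup_patterns (years : List Int) (out : List String) : Prop := out = gen_simple_year_backup_patterns_alt years
instance (years : List Int) (out : List String) : Decidable (Spec_gen_simple_year_backup_patterns years out) := by unfold Spec_gen_simple_year_backup_patterns; infer_instance

-- ===== CLAIM (what is proved, stated in full; the proofs are below) =====
def Claim_equal_gen_simple_year_backup_patterns : Prop := ∀ (years : List Int), Dom_gen_simple_year_backup_patterns years → Spec_gen_simple_year_backup_patterns years (gen_simple_year_backup_patterns years)

-- ===== LEMMAS AND PROOFS =====
theorem gen_foldl_general (years : List Int) (acc : List String) :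
    years.foldl (fun patterns y =>
      patterns ++ [
        "backup_" ++ PySem.Int.toStr y ++ ".zip",
        "backup_" ++ PySem.Int.toStr y ++ ".tar.gz",
        "site_" ++ PySem.Int.toStr y ++ ".zip",
        "site_" ++ PySem.Int.toStr y ++ ".tar.gz",
        "wwwroot_" ++ PySem.Int.toStr y ++ ".zip",
        "wwwroot_" ++ PySem.Int.toStr y ++ ".tar.gz",
        "db_" ++ PySem.Int.toStr y ++ ".sql",
        "db_" ++ PySem.Int.toStr y ++ ".sql.gz"]) acc
    = acc ++ gen_simple_year_backup_patterns_alt years := by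
  induction years generalizing acc with
  | nil => simp [gen_simple_year_backup_patterns_alt]
  | cons y ys ih =>
      simp only [List.foldl_cons, ih, gen_simple_year_backup_patterns_alt,
        List.flatMap_cons, pvTable, List.flatMap_cons, List.map, List.flatMap_nil,
        List.append_assoc, List.nil_append]
      congr 1
      simp [String.append_assoc]

-- ===== VERDICT (by name: the statement is the Claim_ definition above) =====
theorem gen_simple_year_backup_patterns_spec : Claim_equal_gen_simple_year_backup_patterns := by
  intro years _
  unfold Spec_gen_simple_year_backup_patterns gen_simple_year_backup_patterns
  simpa using gen_foldl_general years []
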